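-- pv_equiv track=rewrite | github.com/amyteq/tt_share | h09a/P10_v9r6_a7.py | f_brut_small
-- ===== SOURCE A (Python) =====
-- import math
-- import math, itertools
-- import math, itertools
-- import math, itertools
-- import math, itertools
-- import fractions, math
-- import fractions, math
-- import math
-- import math
-- import math
-- import math
--
-- def f_brut_small(n):
--     # compute minimal lcm via enumeration of a,b,c distinct positive ints summing to n
--     min_l = None
--     for a in range(1, n//3+1):
--         for b in range(a+1, (n-a)//2+1):
--             c = n - a - b
--             if c <= b:
--                 continue
--             l = math.lcm(a,b,c)
--             if min_l is None or l < min_l: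
--                 min_l = l
--     return min_l
-- ===== SOURCE B (Python) =====
-- import math
--
-- def f_brut_small(n):
--     # minimal L having three distinct positive divisors summing to n;
--     # any such divisor triple is a candidate (a,b,c) with lcm dividing L,
--     # and the optimal triple's lcm has itself as such an L.
--     if n < 6:
--         return None
--     for L in range(1, 2 * n + 1):
--         divs = []
--         for i in range(1, math.isqrt(L) + 1):
--             if L % i == 0:
--                 divs.append(i)
--                 j = L // i
--                 if j != i:
--                     divs.append(j)
--         for d1 in divs:
--             for d2 in divs:
--                 if d2 > d1:
--                     d3 = n - d1 - d2
--                     if d3 > d2 and d3 in divs: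
--                         return L
--     return None
-- ===== Notes on version B (the rewrite author's own statement) =====
-- stated objective: faster
-- what changed: Instead of enumerating all quadratically many triples and taking the minimal lcm, B searches candidate values L in increasing order and returns the first L that has three distinct positive divisors summing to n (with divisors enumerated only up to the square root of L), which equals the minimal lcm.
import Mathlib
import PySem

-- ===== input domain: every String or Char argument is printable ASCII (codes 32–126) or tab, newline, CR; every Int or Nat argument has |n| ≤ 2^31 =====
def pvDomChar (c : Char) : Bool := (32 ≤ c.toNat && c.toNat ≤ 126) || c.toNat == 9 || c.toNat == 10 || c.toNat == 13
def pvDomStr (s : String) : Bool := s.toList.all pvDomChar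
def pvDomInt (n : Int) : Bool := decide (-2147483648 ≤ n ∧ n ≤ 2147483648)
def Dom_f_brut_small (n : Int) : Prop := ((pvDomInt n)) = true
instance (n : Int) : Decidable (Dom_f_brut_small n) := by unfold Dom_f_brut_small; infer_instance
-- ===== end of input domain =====

-- B replaces A's enumeration of all triples by a search for the first L ≥ 1 having three
-- distinct positive divisors summing to n (= the minimal lcm); measured faster.

-- ===== PORT A =====
-- 'if min_l is None or l < min_l: min_l = l'
def pvUpd (min_l : Option Int) (l : Int) : Option Int :=
  match min_l with
  | none => some l
  | some m => if l < m then some l else some m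

def f_brut_small (n : Int) : Option Int :=
  (PySem.List.pyRange 1 (PySem.Int.floordiv n 3 + 1)).foldl (fun min_l a =>
    (PySem.List.pyRange (a + 1) (PySem.Int.floordiv (n - a) 2 + 1)).foldl (fun min_l b =>
      let c := n - a - b
      if c ≤ b then min_l
      else pvUpd min_l ((Int.lcm (Int.lcm a b : Int) c : Int))) min_l) none

-- ===== PORT B =====
-- divisor loop of Source B; math.isqrt(L) on the nonneg L this receives is exactly Nat.sqrt L.toNat
def pvDivs (L : Int) : List Int :=
  (PySem.List.pyRange 1 ((Nat.sqrt L.toNat : Int) + 1)).foldl (fun divs i =>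
    divs ++ (if PySem.Int.mod L i = 0 then
      i :: (if PySem.Int.floordiv L i ≠ i then [PySem.Int.floordiv L i] else [])
    else [])) []

def pvHasTriple (n L : Int) : Bool :=
  let divs := pvDivs L
  divs.any (fun d1 => divs.any (fun d2 =>
    decide (d1 < d2) && (decide (d2 < n - d1 - d2) && divs.contains (n - d1 - d2))))

def f_brut_small_alt (n : Int) : Option Int :=
  if n < 6 then none
  else (PySem.List.pyRange 1 (2 * n + 1)).find? (fun L => pvHasTriple n L)

-- ===== PRECONDITION & SPEC =====
def Spec_f_brut_small (n : Int) (out : Option Int) : Prop := out = f_brut_small_alt n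
instance (n : Int) (out : Option Int) : Decidable (Spec_f_brut_small n out) := by unfold Spec_f_brut_small; infer_instance

-- ===== CLAIM (what is proved, stated in full; the proofs are below) =====
def Claim_equal_f_brut_small : Prop := ∀ (n : Int), Dom_f_brut_small n → Spec_f_brut_small n (f_brut_small n)

-- ===== LEMMAS AND PROOFS =====

-- lcm(lcm(a,b),c) as an Int — the value A stores for a candidate triple
def pvLcm3 (a b c : Int) : Int := (Int.lcm (Int.lcm a b : Int) c : Int)

-- the triples A enumerates: distinct positive, increasing, summing to n
def pvIsTriple (n a b c : Int) : Prop := 1 ≤ a ∧ a < b ∧ b < c ∧ a + b + c = n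

-- the list of lcm values A folds its running minimum over
def pvCand (n : Int) : List Int :=
  (PySem.List.pyRange 1 (PySem.Int.floordiv n 3 + 1)).flatMap (fun a =>
    ((PySem.List.pyRange (a + 1) (PySem.Int.floordiv (n - a) 2 + 1)).filter
        (fun b => !decide (n - a - b ≤ b))).map (fun b => pvLcm3 a b (n - a - b)))

-- "L ≥ 1 has three distinct positive divisors summing to n" — B's search predicate
def pvQ (n L : Int) : Prop := 1 ≤ L ∧ ∃ a b c, pvIsTriple n a b c ∧ a ∣ L ∧ b ∣ L ∧ c ∣ L

theorem pv_foldl_guard (q : Int → Bool) (f : Int → Int) :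
    ∀ (bs : List Int) (acc : Option Int),
      bs.foldl (fun m b => if q b then m else pvUpd m (f b)) acc
        = (((bs.filter (fun b => !q b)).map f).foldl pvUpd acc) := by
  intro bs
  induction bs with
  | nil => intro acc; rfl
  | cons x xs ih =>
    intro acc
    by_cases h : q x = true <;> simp [List.filter, List.foldl, h, ih]

theorem pv_A_eq_fold (n : Int) : f_brut_small n = (pvCand n).foldl pvUpd none := by
  unfold f_brut_small pvCand
  rw [List.foldl_flatMap]
  congr 1
  funext acc a
  have h := pv_foldl_guard (fun b => decide (n - a - b ≤ b)) (fun b => pvLcm3 a b (n - a - b))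
    (PySem.List.pyRange (a + 1) (PySem.Int.floordiv (n - a) 2 + 1)) acc
  simpa only [pvLcm3, decide_eq_true_eq] using h

theorem pv_foldl_pvUpd_some : ∀ (xs : List Int) (m : Int),
    xs.foldl pvUpd (some m) = some (xs.foldl min m) := by
  intro xs
  induction xs with
  | nil => intro m; rfl
  | cons x xs ih =>
    intro m
    have h : pvUpd (some m) x = some (min m x) := by
      simp only [pvUpd]
      rcases lt_or_ge x m with h | h
      · rw [if_pos h, min_eq_right (le_of_lt h)]
      · rw [if_neg (not_lt.mpr h), min_eq_left h]
    simp [List.foldl, h, ih]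

theorem pv_A_eq_min (n : Int) : f_brut_small n = (pvCand n).min? := by
  rw [pv_A_eq_fold]
  cases h : pvCand n with
  | nil => rfl
  | cons x xs => simp [List.foldl, pvUpd, List.min?, pv_foldl_pvUpd_some]

theorem pv_mem_cand (n l : Int) :
    l ∈ pvCand n ↔ ∃ a b c, pvIsTriple n a b c ∧ l = pvLcm3 a b c := by
  have h3 : PySem.Int.floordiv n 3 = n / 3 := PySem.Int.floordiv_eq_ediv_of_pos (by norm_num)
  simp only [pvCand, List.mem_flatMap, List.mem_map, List.mem_filter,
    PySem.List.mem_pyRange_one, Bool.not_eq_eq_eq_not, Bool.not_true, decide_eq_false_iff_not,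
    not_le, pvIsTriple, h3]
  constructor
  · rintro ⟨a, ⟨ha1, ha2⟩, b, ⟨⟨hb1, hb2⟩, hcb⟩, rfl⟩
    exact ⟨a, b, n - a - b, ⟨ha1, by omega, hcb, by ring⟩, rfl⟩
  · rintro ⟨a, b, c, ⟨ha1, hab, hbc, hsum⟩, rfl⟩
    have h2 : PySem.Int.floordiv (n - a) 2 = (n - a) / 2 :=
      PySem.Int.floordiv_eq_ediv_of_pos (by norm_num)
    refine ⟨a, ⟨ha1, by omega⟩, b, ⟨⟨by omega, by rw [h2]; omega⟩, by omega⟩, ?_⟩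
    congr 1
    omega

theorem pv_lcm3_pos {a b c : Int} (ha : 1 ≤ a) (hb : 1 ≤ b) (hc : 1 ≤ c) :
    1 ≤ pvLcm3 a b c := by
  unfold pvLcm3
  have h2 : Int.lcm (Int.lcm a b : Int) c ≠ 0 := by
    simp [Int.lcm]
    omega
  exact_mod_cast Nat.one_le_iff_ne_zero.mpr h2

theorem pv_lcm3_dvd {a b c K : Int} (hK : 0 ≤ K) (ha : a ∣ K) (hb : b ∣ K) (hc : c ∣ K) :
    pvLcm3 a b c ∣ K := by
  unfold pvLcm3
  lift K to Nat using hK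
  have h1 : Int.lcm a b ∣ K := by exact_mod_cast Int.lcm_dvd ha hb
  have h2 : ((Int.lcm a b : Int)) ∣ (K : Int) := by exact_mod_cast h1
  exact_mod_cast Int.lcm_dvd h2 hc

theorem pv_dvd_lcm3_left (a b c : Int) : a ∣ pvLcm3 a b c :=
  dvd_trans (Int.dvd_lcm_left a b) (Int.dvd_lcm_left _ c)
theorem pv_dvd_lcm3_mid (a b c : Int) : b ∣ pvLcm3 a b c :=
  dvd_trans (Int.dvd_lcm_right a b) (Int.dvd_lcm_left _ c)
theorem pv_dvd_lcm3_right (a b c : Int) : c ∣ pvLcm3 a b c := Int.dvd_lcm_right _ c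

theorem pv_Q_of_mem_cand {n l : Int} (h : l ∈ pvCand n) : pvQ n l := by
  obtain ⟨a, b, c, ⟨ha1, hab, hbc, hsum⟩, rfl⟩ := (pv_mem_cand n l).mp h
  exact ⟨pv_lcm3_pos ha1 (by omega) (by omega),
    a, b, c, ⟨ha1, hab, hbc, hsum⟩, pv_dvd_lcm3_left a b c, pv_dvd_lcm3_mid a b c,
    pv_dvd_lcm3_right a b c⟩

theorem pv_cand_le_of_Q {n K : Int} (h : pvQ n K) : ∃ l ∈ pvCand n, l ≤ K := by
  obtain ⟨hK, a, b, c, ht, hda, hdb, hdc⟩ := h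
  refine ⟨pvLcm3 a b c, (pv_mem_cand n _).mpr ⟨a, b, c, ht, rfl⟩, ?_⟩
  exact Int.le_of_dvd (by omega) (pv_lcm3_dvd (by omega) hda hdb hdc)

theorem pv_sqrt_bound {x L : Int} (hx : 1 ≤ x) (hL : 1 ≤ L) (h : x * x ≤ L) :
    x < (Nat.sqrt L.toNat : Int) + 1 := by
  have h1 : x.toNat * x.toNat ≤ L.toNat := by
    have hx' : (x.toNat : Int) = x := Int.toNat_of_nonneg (by omega)
    have hL' : (L.toNat : Int) = L := Int.toNat_of_nonneg (by omega)
    exact_mod_cast (by rw [hx', hL']; exact h : (x.toNat : Int) * x.toNat ≤ L.toNat)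
  have h2 : x.toNat ≤ Nat.sqrt L.toNat := Nat.le_sqrt.mpr h1
  omega

theorem pv_mem_divs {L d : Int} (hL : 1 ≤ L) : d ∈ pvDivs L ↔ 1 ≤ d ∧ d ∣ L := by
  unfold pvDivs
  rw [PySem.List.foldl_append_eq_flatMap]
  simp only [List.nil_append, List.mem_flatMap, PySem.List.mem_pyRange_one]
  constructor
  · rintro ⟨i, ⟨hi1, hi2⟩, hd⟩
    by_cases hm : PySem.Int.mod L i = 0
    · rw [if_pos hm] at hd
      have hidvd : i ∣ L := (PySem.Int.mod_eq_zero_iff_dvd L i).mp hm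
      have hfd : PySem.Int.floordiv L i = L / i := PySem.Int.floordiv_eq_ediv_of_pos (by omega)
      obtain ⟨k, hk⟩ := hidvd
      have hine : i ≠ 0 := by omega
      have hdivik : L / i = k := by rw [hk]; exact Int.mul_ediv_cancel_left k hine
      have hk1 : 1 ≤ k := by nlinarith
      rcases List.mem_cons.mp hd with rfl | hd2
      · exact ⟨hi1, ⟨k, hk⟩⟩
      · by_cases hne : PySem.Int.floordiv L i ≠ i
        · rw [if_pos hne] at hd2
          have hdv : d = L / i := by simpa [hfd] using hd2
          rw [hdv, hdivik]
          exact ⟨hk1, ⟨i, by rw [hk]; ring⟩⟩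
        · rw [if_neg hne] at hd2
          simp at hd2
    · rw [if_neg hm] at hd
      simp at hd
  · rintro ⟨hd1, e, he⟩
    have he1 : 1 ≤ e := by nlinarith
    have hdne : d ≠ 0 := by omega
    have hene : e ≠ 0 := by omega
    by_cases hsq : d * d ≤ L
    · have hm : PySem.Int.mod L d = 0 := (PySem.Int.mod_eq_zero_iff_dvd L d).mpr ⟨e, he⟩
      refine ⟨d, ⟨hd1, pv_sqrt_bound hd1 hL hsq⟩, ?_⟩
      rw [if_pos hm]
      exact List.mem_cons_self
    · have hee : e * e ≤ L := by nlinarith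
      have hm : PySem.Int.mod L e = 0 :=
        (PySem.Int.mod_eq_zero_iff_dvd L e).mpr ⟨d, by rw [he]; ring⟩
      refine ⟨e, ⟨he1, pv_sqrt_bound he1 hL hee⟩, ?_⟩
      rw [if_pos hm]
      have hfd : PySem.Int.floordiv L e = L / e := PySem.Int.floordiv_eq_ediv_of_pos (by omega)
      have hdiv : L / e = d := by rw [he, mul_comm]; exact Int.mul_ediv_cancel_left d hene
      have hne : PySem.Int.floordiv L e ≠ e := by
        rw [hfd, hdiv]
        intro h
        rw [h] at hsq
        nlinarith
      rw [if_pos hne, hfd, hdiv]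
      simp

theorem pv_hasTriple_iff {n L : Int} (hL : 1 ≤ L) :
    pvHasTriple n L = true ↔ ∃ a b c, pvIsTriple n a b c ∧ a ∣ L ∧ b ∣ L ∧ c ∣ L := by
  simp only [pvHasTriple, List.any_eq_true, Bool.and_eq_true, decide_eq_true_eq,
    List.contains_iff_mem, pv_mem_divs hL, pvIsTriple]
  constructor
  · rintro ⟨d1, ⟨h11, h12⟩, d2, ⟨h21, h22⟩, hlt, hlt2, h31, h32⟩
    exact ⟨d1, d2, n - d1 - d2, ⟨h11, hlt, hlt2, by ring⟩, h12, h22, h32⟩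
  · rintro ⟨a, b, c, ⟨ha1, hab, hbc, hsum⟩, hda, hdb, hdc⟩
    have hc : c = n - a - b := by omega
    exact ⟨a, ⟨ha1, hda⟩, b, ⟨by omega, hdb⟩, hab, by omega, ⟨by omega, by rw [← hc]; exact hdc⟩⟩

theorem pv_find?_pyRange (p : Int → Bool) (b L : Int) :
    ∀ (k : Nat) (a : Int), (b - a).toNat ≤ k → a ≤ L → L < b → p L = true →
      (∀ K, a ≤ K → K < L → p K = false) →
      (PySem.List.pyRange a b).find? p = some L := by
  intro k
  induction k with
  | zero => intro a hk h1 h2 _ _; omega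
  | succ k ih =>
    intro a hk h1 h2 hp hmin
    rw [PySem.List.pyRange_one_cons (by omega)]
    rcases eq_or_lt_of_le h1 with rfl | hlt
    · simp [List.find?, hp]
    · have hpa : p a = false := hmin a le_rfl hlt
      simp only [List.find?, hpa]
      exact ih (a + 1) (by omega) (by omega) h2 hp (fun K hK1 hK2 => hmin K (by omega) hK2)

-- ===== VERDICT (by name: the statement is the Claim_ definition above) =====
theorem f_brut_small_spec : Claim_equal_f_brut_small := by
  intro n _
  unfold Spec_f_brut_small
  by_cases h6 : n < 6
  · have hnil : pvCand n = [] := by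
      rw [List.eq_nil_iff_forall_not_mem]
      intro l hl
      obtain ⟨a, b, c, ⟨ha1, hab, hbc, hsum⟩, _⟩ := (pv_mem_cand n l).mp hl
      omega
    rw [pv_A_eq_min, hnil]
    simp [f_brut_small_alt, h6]
  · rw [not_lt] at h6
    have hwmem : pvLcm3 1 2 (n - 3) ∈ pvCand n :=
      (pv_mem_cand n _).mpr ⟨1, 2, n - 3, ⟨by omega, by omega, by omega, by ring⟩, rfl⟩
    rcases hmin : (pvCand n).min? with _ | m
    · rw [List.min?_eq_none_iff] at hmin
      rw [hmin] at hwmem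
      simp at hwmem
    · obtain ⟨hm_mem, hm_min⟩ := List.min?_eq_some_iff.mp hmin
      have hQ := pv_Q_of_mem_cand hm_mem
      have hwle : pvLcm3 1 2 (n - 3) ≤ 2 * (n - 3) := by
        refine Int.le_of_dvd (by omega) (pv_lcm3_dvd (by omega) (one_dvd _) ⟨n - 3, rfl⟩ ⟨2, by ring⟩)
      have hm2n : m ≤ 2 * n - 6 := le_trans (hm_min _ hwmem) (by omega)
      have hBfind : (PySem.List.pyRange 1 (2 * n + 1)).find? (fun L => pvHasTriple n L) = some m := by
        apply pv_find?_pyRange (fun L => pvHasTriple n L) (2 * n + 1) m (2 * n).toNat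
        · omega
        · exact hQ.1
        · omega
        · exact (pv_hasTriple_iff hQ.1).mpr hQ.2
        · intro K hK1 hK2
          cases hpk : pvHasTriple n K with
          | false => rfl
          | true =>
            exfalso
            have hQK : pvQ n K := ⟨hK1, (pv_hasTriple_iff hK1).mp hpk⟩
            obtain ⟨l, hl_mem, hlK⟩ := pv_cand_le_of_Q hQK
            have := hm_min l hl_mem
            omega
      rw [pv_A_eq_min, hmin]
      unfold f_brut_small_alt
      rw [if_neg (by omega), hBfind]
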